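/- GENERATED by mk_final_copies.py from the proof of the farm's unit `start_decoder.R3` (farm:start_decoder.R3.1: Lemmas.lean) as the
   re-elaboration sweep compiled it — do not edit. -/
/-
  start_decoder.R3 — the PURE part (no machine walk): where things are (`Geo`), which spans the segment and its callees may write
  (`SpanOK`), and THE CARRY LEMMA (`carrySpans`): the loop invariant `ResLoop` of the residue loop over any batch of such stores.
-/
import Asan.CheckWalk
import Vorbis.Spec.Units.start_decoder_R3
open X86 X86.User Asan Vorbis Vorbis.Spec Vorbis.Spec.StartDecoder

set_option maxRecDepth 4000
set_option maxHeartbeats 4000000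

namespace Vorbis.Spec.start_decoder_R3

/-- **Where everything is**, as numbers for `omega`: the steady stack pointer `R`, the return-address slot `RA`, the decoder object
`*f` (in the data space, off the function's own stack), the block `C = ⟨c, 32·rc⟩` of `residue_config` (an arena block: off the
stack, off `*f`, off the globals' table `log2_4`), the arena inside the function's footprint. -/
structure Geo (g : Ghost) (A : Arena × List Obj) (c n : Nat) : Prop where
  r_ra : g.R + 1480 = g.RA
  r8 : g.R % 8 = 0
  room : 0x700000 + 1888 ≤ g.RA
  top : g.RA + 8 ≤ 0x800000
  f_lo : 0x100000 ≤ g.f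
  f_hi : g.f + 1808 ≤ 0xC00000
  f_stack : g.RA + 8 ≤ g.f ∨ g.f + 1808 ≤ 0x700000 ∨ 0x800000 ≤ g.f
  f_log2 : g.f + 1808 ≤ 0x120640 ∨ 0x120650 ≤ g.f
  c_lo : 0x100000 ≤ c
  c_hi : c + n ≤ 0xC00000
  c_stack : c + n ≤ 0x700000 ∨ 0x800000 ≤ c
  c_f : g.f + 1808 ≤ c ∨ c + n ≤ g.f
  c_log2 : c + n ≤ 0x120640 ∨ 0x120650 ≤ c
  c_arena : g.A0.1.B ≤ c ∧ c + n ≤ g.A0.1.B + g.A0.1.L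

/-- The geometry from the common part of a cut point, the hand-over carrier, the block laws and the arena layer. -/
theorem geo {u₀ : State} {g : Ghost} {pc : Word} {A : Arena × List Obj} {v : State} {c n : Nat}
    (hf : Frame u₀ g pc A v) (hh : g.Hand A) (hok : BlkOK (g.Blk A)) (ha : ArenaOK A.1 A.2 v.mem g.f)
    (hC : A.1.Blk ⟨c, n⟩) : Geo g A c n := by
  obtain ⟨hr1, hr2⟩ := hf.r_eq
  obtain ⟨ha1, ha2, ha3⟩ := hf.ra
  simp only [steady] at hr1
  simp only [depth] at ha2
  have hobjB : g.Blk A (objBlock g.f) := runBlk_extra List.mem_cons_self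
  have hlogB : g.Blk A ⟨0x120640, 16⟩ := by
    apply runBlk_extra
    simp only [fixedBlocks, globalBlocks, List.mem_cons, true_or, or_true]
  have hCB : g.Blk A ⟨c, n⟩ := runBlk_setup hC
  have hfin := hok.inside _ hobjB
  have hcin := hok.inside _ hCB
  simp only [vblock, voff] at hfin
  simp only [] at hcin
  -- `*f` against the table `log2_4`: two different allocated blocks
  have hflog : g.f + 1808 ≤ 0x120640 ∨ 0x120650 ≤ g.f := by
    have hd := hok.disjoint hobjB hlogB (by
      intro e
      have e2 := congrArg Block.size e
      simp only [vblock, voff] at e2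
      omega)
    simp only [vblock, voff] at hd
    omega
  -- `*f` against the function's own stack
  have hfst : g.RA + 8 ≤ g.f ∨ g.f + 1808 ≤ 0x700000 ∨ 0x800000 ≤ g.f := by
    obtain ⟨o, ho, k1, k2⟩ := hh.obj
    simp only [voff] at k2
    rcases List.mem_append.mp ho with hs | hoth
    · unfold stackObjs at hs
      obtain ⟨bF, hbF, hin⟩ := List.mem_flatMap.mp hs
      have hmem : bF ∈ g.frames' := List.mem_cons_of_mem _ hbF
      obtain ⟨a1, a2, _, _, _⟩ := hf.shadow.stack.active bF hmem
      obtain ⟨g1, _⟩ := FrameLayout.objsAt_gran a1 a2 hin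
      have hc := hf.callers bF hbF
      have e : o.gLo = o.base / 8 := rfl
      left
      omega
    · have := hf.shadow.off o hoth
      unfold OffStack at this
      omega
  -- the block of `residue_config`
  obtain ⟨hi1, hi2⟩ := arena_inside ha hC
  have hoffs := ha.blk_off_stack hC
  have hout := hh.objOut
  have hlog := hh.outside ⟨0x120640, 16⟩ (by
    simp only [fixedBlocks, globalBlocks, List.mem_cons, true_or, or_true])
  have hB := hf.ext.B
  have hL := hf.ext.L
  simp only [] at hi1 hi2 hoffs hlog
  simp only [voff] at hout
  refine ⟨hr1, hr2, ha2, ha3, hfin.1, hfin.2, hfst, hflog, hcin.1, hcin.2, hoffs, ?_, ?_, ?_⟩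
  · omega
  · omega
  · rw [← hB, ← hL]
    exact ⟨hi1, hi2⟩

/-- **The spans this segment and its callees may write**: the function's own stack below the steady `rsp` (return addresses,
the callees' frames); the readers' windows of `*f` (`get_bits`, and `error`'s `[f+140, f+144)`); `residue_types[i]`; the first 14
bytes of record `i` (`begin`, `end`, `part_size`, `classifications`, `classbook`) at `r`. -/
def SpanOK (g : Ghost) (r i : Nat) (w : Span) : Prop :=
  (g.RA - 1888 ≤ w.lo ∧ w.hi ≤ g.R) ∨
  (g.f + 48 ≤ w.lo ∧ w.hi ≤ g.f + 56) ∨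
  (g.f + 84 ≤ w.lo ∧ w.hi ≤ g.f + 96) ∨
  (g.f + 136 ≤ w.lo ∧ w.hi ≤ g.f + 144) ∨
  (g.f + 1484 ≤ w.lo ∧ w.hi ≤ g.f + 1749) ∨
  (g.f + 1752 ≤ w.lo ∧ w.hi ≤ g.f + 1784) ∨
  (g.f + 324 + 2 * i ≤ w.lo ∧ w.hi ≤ g.f + 326 + 2 * i) ∨
  (r ≤ w.lo ∧ w.hi ≤ r + 14)

/-- What the carry lemma gives: the loop invariant at the new state, and the reads of `*f` the segment's arithmetic needs. -/
structure Carried (u₀ : State) (g : Ghost) (pc : Word) (i : Nat) (A6 A6c : Arena) (A : Arena × List Obj) (v s : State) : Prop where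
  loop : ResLoop u₀ g pc i i A6 A6c A.1 A s
  count : stb_vorbis.residue_count s.mem g.f = stb_vorbis.residue_count v.mem g.f
  config : stb_vorbis.residue_config s.mem g.f = stb_vorbis.residue_config v.mem g.f
  books : stb_vorbis.codebook_count s.mem g.f = stb_vorbis.codebook_count v.mem g.f
  untouched : ShadowUntouched v.mem s.mem

/-- **THE CARRY LEMMA**: the invariant of the residue loop (`ResLoop`, with `i < residue_count`) survives any batch of stores
all of whose spans are `SpanOK` (the walker's `Mem.SameExcept`), given `Bits` of the new memory (the reader's post) and the
machine-level facts of the new state. -/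
theorem carrySpans {u₀ : State} {g : Ghost} {pc pc' : Word} {i : Nat} {A6 A6c : Arena} {A : Arena × List Obj} {v s : State}
    (h : ResLoop u₀ g pc i i A6 A6c A.1 A v) (hlt : (i : Int) < stb_vorbis.residue_count v.mem g.f)
    {ws : List Span} (hs : Mem.SameExcept ws v.mem s.mem)
    (hws : ∀ w, w ∈ ws → SpanOK g (resAt g v.mem i) i w)
    (hbits : Bits (g.Blk A) g.len s.mem g.f)
    (hrip : s.rip = pc') (hrsp : s.reg .rsp = addr g.R) (hcode : CodeOK u₀ s.mem) (hinv : abiInv s) :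
    Carried u₀ g pc' i A6 A6c A v s := by
  have hfr := h.frame
  have hres := h.res
  have harena := h.mid.arena
  have hok := h.mid.env.ok
  have hCc : A6c.Blk ⟨stb_vorbis.residue_config v.mem g.f, Off.sizeof.Residue * (stb_vorbis.residue_count v.mem g.f).toNat⟩ :=
    hres.R2.1
  have hC := hCc.mono hres.ext6c
  have G := geo hfr h.hand hok harena hC
  obtain ⟨g1, g2, g3, g4, g5, g6, g7, g8, g9, g10, g11, g12, g13, g14⟩ := G
  have hR1 := hres.R1
  have hr : resAt g v.mem i = stb_vorbis.residue_config v.mem g.f + 32 * i := by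
    unfold resAt stb_vorbis.residue_config_at
    rfl
  simp only [voff] at g10 g11 g12 g13 g14
  have hout := h.hand.objOut
  have hzero0 := h.zero
  have hile := h.i_le
  have hcb := (h.mid.own.cb0 (by omega)).ok (h.mid.own.nonnull (by omega))
  have hconsts0 := h.mid.consts
  generalize hF : g.f = F at *
  generalize hR : g.R = R at *
  generalize hRA : g.RA = RA at *
  generalize hc : stb_vorbis.residue_config v.mem F = c at *
  generalize hn : (stb_vorbis.residue_count v.mem F).toNat = n at *
  have hin : i < n := by omega
  have hR2 := hres.R2
  rw [hc, hn] at hR2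
  have eW : Mid.winsAt 6 7 = [(0, 8), (24, 48), (152, 320), (464, 1480), (1749, 1750), (1784, 1788)] := by
    rfl
  -- every span, as arithmetic
  have hw : ∀ w, w ∈ ws →
      (RA - 1888 ≤ w.lo ∧ w.hi ≤ R) ∨ (F + 48 ≤ w.lo ∧ w.hi ≤ F + 56) ∨ (F + 84 ≤ w.lo ∧ w.hi ≤ F + 96) ∨
      (F + 136 ≤ w.lo ∧ w.hi ≤ F + 144) ∨ (F + 1484 ≤ w.lo ∧ w.hi ≤ F + 1749) ∨ (F + 1752 ≤ w.lo ∧ w.hi ≤ F + 1784) ∨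
      (F + 324 + 2 * i ≤ w.lo ∧ w.hi ≤ F + 326 + 2 * i) ∨ (c + 32 * i ≤ w.lo ∧ w.hi ≤ c + 32 * i + 14) := by
    intro w hmem
    have := hws w hmem
    unfold SpanOK at this
    rw [hF, hR, hRA, hr] at this
    exact this
  clear hws
  -- the regions that no span meets
  have eStack : Mem.EqOn R (RA + 8) v.mem s.mem := by
    apply hs.eqOn
    intro w hmem
    rcases hw w hmem with k | k | k | k | k | k | k | k <;> omega
  have eF1 : Mem.EqOn F (F + 48) v.mem s.mem := by
    apply hs.eqOn
    intro w hmem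
    rcases hw w hmem with k | k | k | k | k | k | k | k <;> omega
  have eF2 : Mem.EqOn (F + 96) (F + 136) v.mem s.mem := by
    apply hs.eqOn
    intro w hmem
    rcases hw w hmem with k | k | k | k | k | k | k | k <;> omega
  have eF3 : Mem.EqOn (F + 144) (F + 324 + 2 * i) v.mem s.mem := by
    apply hs.eqOn
    intro w hmem
    rcases hw w hmem with k | k | k | k | k | k | k | k <;> omega
  have eF4 : Mem.EqOn (F + 326 + 2 * i) (F + 1484) v.mem s.mem := by
    apply hs.eqOn
    intro w hmem
    rcases hw w hmem with k | k | k | k | k | k | k | k <;> omega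
  have eF5 : Mem.EqOn (F + 1749) (F + 1752) v.mem s.mem := by
    apply hs.eqOn
    intro w hmem
    rcases hw w hmem with k | k | k | k | k | k | k | k <;> omega
  have eF6 : Mem.EqOn (F + 1784) (F + 1808) v.mem s.mem := by
    apply hs.eqOn
    intro w hmem
    rcases hw w hmem with k | k | k | k | k | k | k | k <;> omega
  have eSh : Mem.EqOn 0xC00000 0xE00000 v.mem s.mem := by
    apply hs.eqOn
    intro w hmem
    rcases hw w hmem with k | k | k | k | k | k | k | k <;> omega
  have eLog : Mem.EqOn 0x120640 0x120650 v.mem s.mem := by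
    apply hs.eqOn
    intro w hmem
    rcases hw w hmem with k | k | k | k | k | k | k | k <;> omega
  -- the reads of `*f`
  have ecount : stb_vorbis.residue_count s.mem F = stb_vorbis.residue_count v.mem F := by
    simp only [vacc, voff]
    exact eF3.i32 _ (by omega) (by omega) (by omega)
  have econf : stb_vorbis.residue_config s.mem F = stb_vorbis.residue_config v.mem F := by
    simp only [vacc, voff]
    exact eF4.u64 _ (by omega) (by omega) (by omega)
  have ebooks : stb_vorbis.codebook_count s.mem F = stb_vorbis.codebook_count v.mem F := by
    simp only [vacc, voff]
    exact eF3.i32 _ (by omega) (by omega) (by omega)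
  have eat : ∀ j, stb_vorbis.residue_config_at s.mem F j = stb_vorbis.residue_config_at v.mem F j := by
    intro j
    unfold stb_vorbis.residue_config_at
    rw [econf]
  -- every other block of the arena is kept
  have keptBlk : ∀ B, A.1.Blk B → B ≠ ⟨c, Off.sizeof.Residue * n⟩ → B.Kept v.mem s.mem := by
    intro B hB hne
    have hd := arena_disjoint harena hB hC hne
    obtain ⟨i1, i2⟩ := arena_inside harena hB
    have hoff := harena.blk_off_stack hB
    have hnw := harena.blkOK.no_wrap hB
    simp only [vblock, voff] at hd
    simp only [voff] at hout
    apply Block.Kept.of_sameExcept hs _ hnw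
    intro w hmem
    rcases hw w hmem with k | k | k | k | k | k | k | k <;> omega
  have keptOld : ∀ B, A6.Blk B → B.Kept v.mem s.mem := by
    intro B hB
    exact keptBlk B ((hB.mono hres.ext6).mono hres.ext6c) (Since.ne_old hB hR2)
  have keptYoung : ∀ B, Since A6c A.1 B → B.Kept v.mem s.mem := by
    intro B hB
    exact keptBlk B hB.1 (Since.ne_old hCc hB).symm
  -- the windows of `*f` that `Mid` reads
  have heMid : ObjEq (Mid.winsAt 6 7) v.mem F s.mem F := by
    apply ObjEq.of_sameExcept hs
    · intro w hmem
      rw [eW] at hmem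
      simp only [List.mem_cons, List.mem_nil_iff, or_false] at hmem
      rcases hmem with rfl | rfl | rfl | rfl | rfl | rfl <;> simp only [] <;> omega
    · intro w hmem sp hsp
      rw [eW] at hmem
      simp only [List.mem_cons, List.mem_nil_iff, or_false] at hmem
      rcases hmem with rfl | rfl | rfl | rfl | rfl | rfl <;> simp only [] <;>
        rcases hw sp hsp with k | k | k | k | k | k | k | k <;> omega
  have hconsts : SDFrameConsts 6 s.mem R :=
    hconsts0.frame (Mem.EqOn.mono eStack (by omega) (by omega)) (by omega)
  have hslot : s.mem.i32 (R + 0x28) = v.mem.i32 (R + 0x28) := eStack.i32 _ (by omega) (by omega) (by omega)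
  have harena' : ArenaOK A.1 A.2 s.mem F := by
    apply harena.frame (by simp only [voff]; omega)
    simp only [voff]
    exact Mem.EqOn.mono eF2 (by omega) (by omega)
  have hmid : Mid g 6 6 7 A6 A s.mem := by
    apply h.mid.frame
    · rw [hF]
      exact heMid
    · exact keptOld
    · rw [hR]
      exact hconsts
    · intro _ _
      rw [hR]
      exact hslot
    · exact eSh
    · rw [hF]
      exact harena'
    · rw [hF]
      exact hbits
  -- the common part of the cut point
  have hframe : Frame u₀ g pc' A s := by
    refine ⟨hfr.entry, hrip, (by rw [hR]; exact hrsp), ?_, ?_, ?_, ?_, ?_, ?_, ?_, ?_, hcode, hinv, hfr.shadow.untouched eSh, hfr.offText, hfr.ext,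
      hfr.callers, ?_, ?_⟩
    · rw [hR, eStack.u64 _ (by omega) (by omega) (by omega)]
      have := hfr.shadowIdx
      rw [hR] at this
      exact this
    · rw [hR, eStack.u64 _ (by omega) (by omega) (by omega)]
      have := hfr.saved_rbx
      rw [hR] at this
      exact this
    · rw [hR, eStack.u64 _ (by omega) (by omega) (by omega)]
      have := hfr.saved_rbp
      rw [hR] at this
      exact this
    · rw [hR, eStack.u64 _ (by omega) (by omega) (by omega)]
      have := hfr.saved_r12
      rw [hR] at this
      exact this
    · rw [hR, eStack.u64 _ (by omega) (by omega) (by omega)]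
      have := hfr.saved_r13
      rw [hR] at this
      exact this
    · rw [hR, eStack.u64 _ (by omega) (by omega) (by omega)]
      have := hfr.saved_r14
      rw [hR] at this
      exact this
    · rw [hR, eStack.u64 _ (by omega) (by omega) (by omega)]
      have := hfr.saved_r15
      rw [hR] at this
      exact this
    · rw [hR, eStack.u64 _ (by omega) (by omega) (by omega)]
      have := hfr.saved_ra
      rw [hR] at this
      exact this
    · -- SH7: the table `log2_4`
      intro k hk
      have e := hfr.sh7 k hk
      have e1 : (UInt64.ofNat (Vorbis.Globals.log2_4.beg + k)).toNat = 0x120640 + k := by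
        rw [UInt64.toNat_ofNat']
        show (0x120640 + k) % 2 ^ 64 = _
        omega
      rw [eLog.readLE _ 1 (by omega) (by omega) (by omega)]
      exact e
    · -- the function's footprint
      apply hfr.same.step_same hs
      intro w hmem a a1 a2
      unfold footprint writes
      rcases hw w hmem with k | k | k | k | k | k | k | k
      · refine ⟨_, List.mem_cons_self, ?_, ?_⟩
        · show g.RA - depth ≤ a
          simp only [depth]
          omega
        · show a < g.RA
          omega
      all_goals first
        | (refine ⟨_, List.mem_cons_of_mem _ List.mem_cons_self, ?_, ?_⟩
           · show (g.e.reg .rdi).toNat ≤ a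
             have : (g.e.reg .rdi).toNat = F := hF
             omega
           · show a < (g.e.reg .rdi).toNat + Off.sizeof.stb_vorbis
             have : (g.e.reg .rdi).toNat = F := hF
             simp only [voff]
             omega)
        | (refine ⟨_, List.mem_cons_of_mem _ (List.mem_cons_of_mem _ (List.mem_cons_of_mem _ List.mem_cons_self)), ?_, ?_⟩
           · show g.A0.1.B ≤ a
             omega
           · show a < g.A0.1.B + g.A0.1.L
             omega)
  -- RES(i)
  have hcbKept := keptOld _ hcb.F2
  have hres' : ResTrans A6 A6c A.1 A.1 s.mem F i := by
    refine ⟨hres.ext6, hres.ext6c, hres.exti, ?_, ?_, ?_, ?_, ?_⟩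
    · rw [ecount]
      exact hres.n_le
    · rw [ecount]
      exact hres.R1
    · rw [ecount, econf, hc, hn]
      have := hres.R2
      rw [hc, hn] at this
      exact this
    · intro i' hi'
      have e : stb_vorbis.residue_types s.mem F i' = stb_vorbis.residue_types v.mem F i' := by
        simp only [vacc, voff]
        exact eF3.u16 _ (by omega) (by omega) (by omega)
      rw [e]
      exact hres.R3 i' hi'
    · intro i' hi'
      rw [eat i']
      have hrec := hres.record i' hi'
      have h7 := hrec.R7
      have hrb : (Block.mk (stb_vorbis.residue_config_at v.mem F i') Off.sizeof.Residue).Kept v.mem s.mem := by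
        apply Block.Kept.of_sameExcept hs
        · intro w hmem
          simp only [stb_vorbis.residue_config_at, voff]
          rw [hc]
          rcases hw w hmem with k | k | k | k | k | k | k | k <;> omega
        · simp only [stb_vorbis.residue_config_at, voff]
          rw [hc]
          omega
      have hcbk : (Block.mk (Residue.cbk v.mem F (stb_vorbis.residue_config_at v.mem F i')) 8).Kept v.mem s.mem := by
        apply hcbKept.mono
        · simp only [vacc, voff]
          omega
        · simp only [vacc, voff] at h7 ⊢
          omega
      have heAt : ObjEq ResidueAtOK.wins v.mem F s.mem F := by
        apply heMid.sub
        intro w hmem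
        simp only [ResidueAtOK.wins, List.mem_cons, List.mem_nil_iff, or_false] at hmem
        subst hmem
        refine ⟨(152, 320), ?_, ?_, ?_⟩
        · rw [eW]
          simp only [List.mem_cons, true_or, or_true]
        · simp only []
          omega
        · simp only []
          omega
      have hrd := ResidueReads.of_kept heAt hrb hcbk
      apply hrec.frame hrd
      · intro B hO
        cases hO with
        | books => exact keptYoung _ hrec.R8
        | classdata => exact keptYoung _ hrec.R8a
        | row q hq => exact keptYoung _ (hrec.R8a_row q hq)
      · intro B _ hb
        exact hb
  have hzero : ResidueZeroFrom s.mem F i := by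
    intro i' h1 h2
    rw [ecount] at h2
    rw [eat i']
    have hz := hzero0 i' h1 h2
    have e : Residue.classdata s.mem (stb_vorbis.residue_config_at v.mem F i')
        = Residue.classdata v.mem (stb_vorbis.residue_config_at v.mem F i') := by
      simp only [Residue.classdata, stb_vorbis.residue_config_at, voff, Mem.ptr]
      rw [hc]
      have eq : Mem.EqOn (c + 32 * i' + 16) (c + 32 * i' + 24) v.mem s.mem := by
        apply hs.eqOn
        intro w hmem
        rcases hw w hmem with k | k | k | k | k | k | k | k <;> omega
      exact eq.u64 _ (by omega) (by omega) (by omega)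
    rw [e]
    exact hz
  refine ⟨⟨hframe, h.hand, hmid, ?_, ?_, ?_⟩, ?_, ?_, ?_, eSh⟩
  · rw [hF, ecount]
    exact hile
  · rw [hF]
    exact hres'
  · rw [hF]
    exact hzero
  · rw [hF]
    exact ecount
  · rw [hF]
    exact econf
  · rw [hF]
    exact ebooks

/-- The spans of the segment's OWN stores: return addresses below the steady `rsp`, `residue_types[i]`, record `i`. -/
def SpanOwn (g : Ghost) (r i : Nat) (w : Span) : Prop :=
  (g.RA - 1888 ≤ w.lo ∧ w.hi ≤ g.R) ∨
  (g.f + 324 + 2 * i ≤ w.lo ∧ w.hi ≤ g.f + 326 + 2 * i) ∨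
  (r ≤ w.lo ∧ w.hi ≤ r + 14)

/-- The spans of a callee's footprint (`get_bits`, `error`): its stack, the readers' windows of `*f`. -/
def SpanCallee (g : Ghost) (w : Span) : Prop :=
  (g.RA - 1888 ≤ w.lo ∧ w.hi ≤ g.R) ∨
  (g.f + 48 ≤ w.lo ∧ w.hi ≤ g.f + 56) ∨
  (g.f + 84 ≤ w.lo ∧ w.hi ≤ g.f + 96) ∨
  (g.f + 136 ≤ w.lo ∧ w.hi ≤ g.f + 144) ∨
  (g.f + 1484 ≤ w.lo ∧ w.hi ≤ g.f + 1749) ∨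
  (g.f + 1752 ≤ w.lo ∧ w.hi ≤ g.f + 1784)

/-- An own store is an allowed store. -/
theorem SpanOwn.ok {g : Ghost} {r i : Nat} {w : Span} (h : SpanOwn g r i w) : SpanOK g r i w := by
  unfold SpanOwn at h
  unfold SpanOK
  omega

/-- A callee's span is an allowed store. -/
theorem SpanCallee.ok {g : Ghost} {r i : Nat} {w : Span} (h : SpanCallee g w) : SpanOK g r i w := by
  unfold SpanCallee at h
  unfold SpanOK
  omega

/-- Two footprints in sequence. -/
theorem sameExcept_append {ws1 ws2 : List Span} {m0 m1 m2 : Mem} (h1 : Mem.SameExcept ws1 m0 m1)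
    (h2 : Mem.SameExcept ws2 m1 m2) : Mem.SameExcept (ws1 ++ ws2) m0 m2 := by
  apply Mem.SameExcept.trans (ν := m1)
  · apply h1.mono
    intro w hw a a1 a2
    exact ⟨w, List.mem_append_left _ hw, a1, a2⟩
  · apply h2.mono
    intro w hw a a1 a2
    exact ⟨w, List.mem_append_right _ hw, a1, a2⟩

/-- **THE CARRY LEMMA, as the stages use it**: the segment's own stores (`hs1`, from the walker's `w_mem` by `u_same`), then a
callee's footprint (`hs2`, the walker's `w_same`). -/
theorem carry2 {u₀ : State} {g : Ghost} {pc pc' : Word} {i : Nat} {A6 A6c : Arena} {A : Arena × List Obj} {v s : State}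
    (h : ResLoop u₀ g pc i i A6 A6c A.1 A v) (hlt : (i : Int) < stb_vorbis.residue_count v.mem g.f)
    {ws1 ws2 : List Span} {m1 : Mem} (hs1 : Mem.SameExcept ws1 v.mem m1) (hs2 : Mem.SameExcept ws2 m1 s.mem)
    (hws1 : ∀ w, w ∈ ws1 → SpanOwn g (resAt g v.mem i) i w) (hws2 : ∀ w, w ∈ ws2 → SpanCallee g w)
    (hbits : Bits (g.Blk A) g.len s.mem g.f)
    (hrip : s.rip = pc') (hrsp : s.reg .rsp = addr g.R) (hcode : CodeOK u₀ s.mem) (hinv : abiInv s) :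
    Carried u₀ g pc' i A6 A6c A v s := by
  apply carrySpans h hlt (sameExcept_append hs1 hs2) _ hbits hrip hrsp hcode hinv
  intro w hw
  rcases List.mem_append.mp hw with k | k
  · exact (hws1 w k).ok
  · exact (hws2 w k).ok

/-- **A range of `*f`'s configuration fields or of the block of `residue_config` reads the same** after the segment's own stores
(if they miss it: `hmiss`) and a callee's footprint (which never meets it). -/
theorem keepRange {u₀ : State} {g : Ghost} {pc : Word} {i : Nat} {A6 A6c : Arena} {A : Arena × List Obj} {v : State}
    (h : ResLoop u₀ g pc i i A6 A6c A.1 A v)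
    {ws1 ws2 : List Span} {m1 m2 : Mem} (hs1 : Mem.SameExcept ws1 v.mem m1) (hs2 : Mem.SameExcept ws2 m1 m2)
    (hws2 : ∀ w, w ∈ ws2 → SpanCallee g w) (lo hi : Nat)
    (hin : (g.f + 152 ≤ lo ∧ hi ≤ g.f + 1480) ∨
      (stb_vorbis.residue_config v.mem g.f ≤ lo ∧
        hi ≤ stb_vorbis.residue_config v.mem g.f + 32 * (stb_vorbis.residue_count v.mem g.f).toNat))
    (hmiss : ∀ w, w ∈ ws1 → hi ≤ w.lo ∨ w.hi ≤ lo) : Mem.EqOn lo hi v.mem m2 := by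
  have hres := h.res
  have hC := hres.R2.1.mono hres.ext6c
  have G := geo h.frame h.hand h.mid.env.ok h.mid.arena hC
  obtain ⟨g1, g2, g3, g4, g5, g6, g7, g8, g9, g10, g11, g12, g13, g14⟩ := G
  simp only [voff] at g10 g11 g12 g13 g14
  apply (sameExcept_append hs1 hs2).eqOn
  intro w hw
  rcases List.mem_append.mp hw with k | k
  · exact hmiss w k
  · have := hws2 w k
    unfold SpanCallee at this
    omega

/-- `Bits` after the segment's own stores (none of them meets a field that `Bits` reads). -/
theorem bitsOwn {u₀ : State} {g : Ghost} {pc : Word} {i : Nat} {A6 A6c : Arena} {A : Arena × List Obj} {v : State}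
    (h : ResLoop u₀ g pc i i A6 A6c A.1 A v) (hlt : (i : Int) < stb_vorbis.residue_count v.mem g.f)
    {ws : List Span} {m : Mem} (hs : Mem.SameExcept ws v.mem m)
    (hws : ∀ w, w ∈ ws → SpanOwn g (resAt g v.mem i) i w) : Bits (g.Blk A) g.len m g.f := by
  have hres := h.res
  have hC := hres.R2.1.mono hres.ext6c
  have G := geo h.frame h.hand h.mid.env.ok h.mid.arena hC
  obtain ⟨g1, g2, g3, g4, g5, g6, g7, g8, g9, g10, g11, g12, g13, g14⟩ := G
  simp only [voff] at g10 g11 g12 g13 g14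
  have hR1 := hres.R1
  have hr : resAt g v.mem i = stb_vorbis.residue_config v.mem g.f + 32 * i := by
    unfold resAt stb_vorbis.residue_config_at
    rfl
  apply h.mid.bits.frame_fields
  apply Bits.SameFields.of_sameExcept hs
  all_goals
    intro w hw
    have := hws w hw
    unfold SpanOwn at this
    rw [hr] at this
    omega

/-- `Bits` after a callee that writes `f->error` only (and its own stack). -/
theorem bitsError {u₀ : State} {g : Ghost} {pc : Word} {A : Arena × List Obj} {v : State} {c n : Nat}
    (hf : Frame u₀ g pc A v) (hh : g.Hand A) (hok : BlkOK (g.Blk A)) (ha : ArenaOK A.1 A.2 v.mem g.f) (hC : A.1.Blk ⟨c, n⟩)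
    {m1 m2 : Mem} (hb : Bits (g.Blk A) g.len m1 g.f) {ws : List Span} (hs : Mem.SameExcept ws m1 m2)
    (hws : ∀ w, w ∈ ws → (g.RA - 1888 ≤ w.lo ∧ w.hi ≤ g.R) ∨ (g.f + 136 ≤ w.lo ∧ w.hi ≤ g.f + 144)) :
    Bits (g.Blk A) g.len m2 g.f := by
  have G := geo hf hh hok ha hC
  obtain ⟨g1, g2, g3, g4, g5, g6, g7, g8, g9, g10, g11, g12, g13, g14⟩ := G
  apply hb.frame_fields
  apply Bits.SameFields.of_sameExcept hs
  all_goals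
    intro w hw
    have := hws w hw
    omega

/-- The live set inside the function contains that of the callers. -/
theorem liveSub (g : Ghost) (others : List Obj) (o : Obj) (ho : o ∈ stackObjs g.frames ++ others) :
    o ∈ stackObjs g.frames' ++ others := by
  unfold Ghost.frames'
  rw [stackObjs_cons]
  rcases List.mem_append.mp ho with h1 | h2
  · exact List.mem_append_left _ (List.mem_append_right _ h1)
  · exact List.mem_append_right _ h2

/-- **The two objects the segment's checks are about**: `*f` and the block of `residue_config`, each inside ONE live object. -/
theorem lives {u₀ : State} {g : Ghost} {pc : Word} {i : Nat} {A6 A6c : Arena} {A : Arena × List Obj} {v : State}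
    (h : ResLoop u₀ g pc i i A6 A6c A.1 A v) :
    LiveIn A.2 g.frames' g.f 1808 ∧
      LiveIn A.2 g.frames' (stb_vorbis.residue_config v.mem g.f) (32 * (stb_vorbis.residue_count v.mem g.f).toNat) := by
  have hC := h.res.R2.1.mono h.res.ext6c
  have hl := liveIn_of_arenaBlk (frames := g.frames') h.mid.arena hC
  simp only [voff] at hl
  refine ⟨?_, hl⟩
  have := h.hand.obj.mono (liveSub g A.2)
  simp only [voff] at this
  exact this

/-- **The precondition of `get_bits(f, n)`** at a call from inside the segment: `rsp = R − 8` (the return address was pushed),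
no shadow byte written, `rdi = f`, `Bits` of the present memory, `n ≤ 32`. -/
theorem getBitsPre {u₀ : State} {g : Ghost} {pc : Word} {i : Nat} {A6 A6c : Arena} {A : Arena × List Obj} {v s : State}
    (h : ResLoop u₀ g pc i i A6 A6c A.1 A v) (hrsp : (s.reg .rsp).toNat + 8 = g.R) (hun : ShadowUntouched v.mem s.mem)
    (hrdi : (s.reg .rdi).toNat = g.f) (hbits : Bits (g.Blk A) g.len s.mem g.f) (hn : bitsArg s ≤ 32) :
    (get_bits.spec A.2 g.frames' (g.Blk A) g.len).pre s := by
  refine ⟨⟨⟨?_, h.frame.offText⟩, ?_, ?_⟩, hn⟩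
  · rw [hrsp]
    exact h.frame.shadow.untouched hun
  · rw [hrdi]
    exact ⟨h.mid.env.live, h.hand.obj.mono (liveSub g A.2), fun hl => (h.hand.inp hl).mono (liveSub g A.2)⟩
  · rw [hrdi]
    exact hbits

/-- **The precondition of `error(f, e)`** at a call from inside the segment. -/
theorem errorPre {u₀ : State} {g : Ghost} {pc : Word} {i : Nat} {A6 A6c : Arena} {A : Arena × List Obj} {v s : State}
    (h : ResLoop u₀ g pc i i A6 A6c A.1 A v) (hrsp : (s.reg .rsp).toNat + 8 = g.R) (hun : ShadowUntouched v.mem s.mem)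
    (hrdi : (s.reg .rdi).toNat = g.f) : (error.spec A.2 g.frames').pre s := by
  refine ⟨⟨?_, h.frame.offText⟩, ?_⟩
  · rw [hrsp]
    exact h.frame.shadow.untouched hun
  · rw [hrdi]
    exact h.hand.obj.mono (liveSub g A.2)

/-- **An error exit of the segment**: SD.ERR from the loop invariant (record `i` has `classdata = NULL`; `mapping = NULL`). -/
theorem failed_of_loop {u₀ : State} {g : Ghost} {pc : Word} {i : Nat} {A6 A6c : Arena} {A : Arena × List Obj} {s : State}
    (h : ResLoop u₀ g pc i i A6 A6c A.1 A s) : Failed g.len g.f (g.Live A) A s.mem := by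
  have hd : ResidueDeinitOK A.1.Blk s.mem g.f := h.res.upTo.deinit_head h.zero (h.mid.own.nonnull (by omega))
  have h2 : H2 (g.Blk A) s.mem g.f := H2.mono (ResidueDeinitOK.h2 hd h.res.R1.2) (fun _ hB => runBlk_setup hB)
  have h3 : H3 (g.Blk A) s.mem g.f := H3.mono (ResidueDeinitOK.h3 hd) (fun _ hB => runBlk_setup hB)
  exact h.mid.failed (by omega) h2 h3 (h.mid.h5_null (by omega) _)

/-- `movsxd` of a small counter is the counter. -/
theorem sext_addr (i : Nat) (hi : i < 2 ^ 31) : Word.ofBV (BitVec.signExtend 64 (Word.part .w32 (addr i))) = addr i := by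
  apply UInt64.toNat_inj.mp
  have e : (addr i).toNat = i := toNat_addr i (by omega)
  have e2 : (Word.part .w32 (addr i)).toNat = i := by
    rw [toNat_part32, e]
    omega
  rw [toNat_sext32 _ (by omega), e2, e]

/-- The steady stack pointer as the walker writes it: the entry `rsp` minus 1480. -/
theorem rsp_steady (g : Ghost) (h : 1480 ≤ (g.e.reg .rsp).toNat) : addr g.R = g.e.reg .rsp - 1480 := by
  have e : g.R = (g.e.reg .rsp).toNat - 1480 := rfl
  rw [e, ← addr_sub_lit _ _ h, addr_toNat]

/-- `r = residue_config + (i << 5)`, as a number. -/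
theorem shl5_add (i c : Nat) (hi : i < 64) (hc : c < 2 ^ 32) : addr i <<< 5 + UInt64.ofNat c = addr (c + 32 * i) := by
  apply UInt64.toNat_inj.mp
  have e : (addr i).toNat = i := toNat_addr i (by omega)
  have e2 : (addr (c + 32 * i)).toNat = c + 32 * i := toNat_addr _ (by omega)
  have e5 : (5 : UInt64).toNat = 5 := rfl
  have e32 : 2 ^ (5 % 64) = 32 := by decide
  rw [UInt64.toNat_add, UInt64.toNat_shiftLeft, e, e2, e5, UInt64.toNat_ofNat', Nat.shiftLeft_eq, e32]
  omega

/-- A field address `addr a + k` as a number. -/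
theorem toNat_addr_add (a : Nat) (w : Word) (k : Nat) (hw : w.toNat = k) (h : a + k < 2 ^ 64) : (addr a + w).toNat = a + k := by
  have e : (addr a).toNat = a := toNat_addr a (by omega)
  rw [UInt64.toNat_add, e, hw]
  omega

/-- **What every cut point inside the segment carries**: the loop invariant at that address, `rbp = f`, `r14d = i`, `i < residue_count`,
`rbx = r` (from 0x115a0e on). -/
structure Stage (u₀ : State) (g : Ghost) (pc : Word) (i : Nat) (A6 A6c : Arena) (A : Arena × List Obj) (s : State) : Prop where
  loop : ResLoop u₀ g pc i i A6 A6c A.1 A s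
  rbp : s.reg .rbp = addr g.f
  r14 : s.reg .r14 = addr i
  lt : (i : Int) < stb_vorbis.residue_count s.mem g.f
  rbx : s.reg .rbx = addr (resAt g s.mem i)

/-- **A callee's footprint never meets the configuration fields of `*f` nor the block of `residue_config`.** -/
theorem keepCallee {u₀ : State} {g : Ghost} {pc : Word} {i : Nat} {A6 A6c : Arena} {A : Arena × List Obj} {v : State}
    (h : ResLoop u₀ g pc i i A6 A6c A.1 A v)
    {ws2 : List Span} {m1 m2 : Mem} (hs2 : Mem.SameExcept ws2 m1 m2)
    (hws2 : ∀ w, w ∈ ws2 → SpanCallee g w) (lo hi : Nat)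
    (hin : (g.f + 152 ≤ lo ∧ hi ≤ g.f + 1480) ∨
      (stb_vorbis.residue_config v.mem g.f ≤ lo ∧
        hi ≤ stb_vorbis.residue_config v.mem g.f + 32 * (stb_vorbis.residue_count v.mem g.f).toNat)) :
    Mem.EqOn lo hi m1 m2 := by
  have hres := h.res
  have hC := hres.R2.1.mono hres.ext6c
  have G := geo h.frame h.hand h.mid.env.ok h.mid.arena hC
  obtain ⟨g1, g2, g3, g4, g5, g6, g7, g8, g9, g10, g11, g12, g13, g14⟩ := G
  simp only [voff] at g10 g11 g12 g13 g14
  apply hs2.eqOn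
  intro w hw
  have := hws2 w hw
  unfold SpanCallee at this
  omega

/-- The six windows of `get_bits`' footprint (the walker's `w_same`, with `rsp = R − 8` and `rdi = f` resolved) are a callee's spans. -/
theorem getBits_spans (g : Ghost) (RSP F : Nat) (hRA : g.RA = RSP) (hR : g.R = RSP - 1480) (hF : g.f = F)
    (hroom : 0x700000 + 1888 ≤ RSP) (w : Span)
    (hw : w ∈ [(⟨RSP - 1488 - 352, RSP - 1488⟩ : Span), ⟨F + 48, F + 56⟩, ⟨F + 84, F + 96⟩, ⟨F + 136, F + 144⟩,
      ⟨F + 1484, F + 1749⟩, ⟨F + 1752, F + 1784⟩]) : SpanCallee g w := by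
  simp only [List.mem_cons, List.mem_nil_iff, or_false] at hw
  unfold SpanCallee
  rw [hRA, hR, hF]
  rcases hw with rfl | rfl | rfl | rfl | rfl | rfl <;> simp only [] <;> omega

/-- The two windows of `error`'s footprint are a callee's spans. -/
theorem error_spans (g : Ghost) (RSP F : Nat) (hRA : g.RA = RSP) (hR : g.R = RSP - 1480) (hF : g.f = F)
    (hroom : 0x700000 + 1888 ≤ RSP) (w : Span)
    (hw : w ∈ [(⟨RSP - 1488 - 48, RSP - 1488⟩ : Span), ⟨F + 140, F + 140 + 4⟩]) : SpanCallee g w := by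
  simp only [List.mem_cons, List.mem_nil_iff, or_false] at hw
  unfold SpanCallee
  rw [hRA, hR, hF]
  rcases hw with rfl | rfl <;> simp only [] <;> omega

/-- `lea r12d, [rax+1]` of a 24-bit value, as the dword stored. -/
theorem val32_succ (z : Word) (h : z.toNat < 2 ^ 24) : (BitVec.setWidth 32 (z + 1).toBitVec).toNat = z.toNat + 1 := by
  have e1 : (1 : Word).toNat = 1 := rfl
  simp only [BitVec.toNat_setWidth, UInt64.toNat_toBitVec, UInt64.toNat_add, e1]
  omega

/-- `lea r12d, [rax+1]` of a 6-bit value, as the byte stored. -/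
theorem val8_succ (z : Word) (h : z.toNat < 2 ^ 6) :
    (BitVec.setWidth 8 (BitVec.setWidth 32 (z + 1).toBitVec)).toNat = z.toNat + 1 := by
  have e1 : (1 : Word).toNat = 1 := rfl
  simp only [BitVec.toNat_setWidth, UInt64.toNat_toBitVec, UInt64.toNat_add, e1]
  omega

/-- `cmp r12d, [f->codebook_count] ; jl` (signed) with `r12d` a zero-extended byte: `classbook < codebook_count`. -/
theorem jl_classbook (z : Word) (cb : Nat) (hz : z.toNat < 2 ^ 8) (hcb : cb < 2 ^ 32) :
    ((BitVec.zeroExtend 32 (BitVec.setWidth 8 (Word.part .w32 z))).toInt < (BitVec.ofNat 32 cb).toInt) ↔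
    ((z.toNat : Int) < sint32 cb) := by
  have e1 : (BitVec.zeroExtend 32 (BitVec.setWidth 8 (Word.part .w32 z))).toNat = z.toNat := by
    simp only [BitVec.zeroExtend, BitVec.toNat_setWidth, toNat_part32]
    omega
  have e2 : (BitVec.ofNat 32 cb).toNat = cb := by
    simp only [BitVec.toNat_ofNat]
    omega
  rw [BitVec.toInt_eq_toNat_cond, BitVec.toInt_eq_toNat_cond, e1, e2]
  rcases sint32_cases cb with ⟨h1, h2⟩ | ⟨h1, h2⟩
  · rw [h2, if_pos (by omega), if_pos (by omega)]
  · rw [h2, if_pos (by omega), if_neg (by omega)]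
    omega

end Vorbis.Spec.start_decoder_R3
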